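-- pv_equiv track=rewrite | github.com/aaPanel/BaoTa | class/files.py | f_name_check
-- ===== SOURCE A (Python) =====
-- def f_name_check(filename):
--     '''
--         @name 文件名检测2
--         @author hwliang<2021-03-16>
--         @param filename<string> 文件名
--         @return bool
--     '''
--     f_strs = [';', '&', '<', '>']
--     if not filename:
--         return False
--     for fs in f_strs:
--         if filename.find(fs) != -1:
--             return False
--     return True
-- ===== SOURCE B (Python) =====
-- def f_name_check(filename):
--     forbidden = {';', '&', '<', '>'}
--     if not filename:
--         return False
--     for c in filename:
--         if c in forbidden:
--             return False
--     return True
-- ===== Notes on version B (the rewrite author's own statement) =====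
-- stated objective: simpler
-- what changed: Inverted the loop: B makes a single pass over the characters of filename testing set membership, instead of A's four full-string find scans, one per forbidden character.
import Mathlib
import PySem

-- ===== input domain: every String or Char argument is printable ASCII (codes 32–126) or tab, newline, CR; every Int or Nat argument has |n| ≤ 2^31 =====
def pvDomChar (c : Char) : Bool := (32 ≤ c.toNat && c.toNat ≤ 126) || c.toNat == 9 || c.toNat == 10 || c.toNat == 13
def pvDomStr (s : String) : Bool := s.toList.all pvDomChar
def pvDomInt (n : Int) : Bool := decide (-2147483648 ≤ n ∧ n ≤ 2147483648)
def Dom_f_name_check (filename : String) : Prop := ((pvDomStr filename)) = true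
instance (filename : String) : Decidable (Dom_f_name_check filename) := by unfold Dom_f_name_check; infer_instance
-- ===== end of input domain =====

-- ===== PORT A =====
-- B makes a single pass over filename's characters with a membership test,
-- instead of A's four find scans over the whole string (objective: simpler).
def f_name_check (filename : String) : Bool :=
  if filename = "" then false
  else if ([";", "&", "<", ">"].any (fun fs => PySem.Str.find filename fs ≠ -1)) then false
  else true

-- ===== PORT B =====
def f_name_check_alt (filename : String) : Bool :=
  if filename = "" then false
  else if (filename.toList.any (fun c => [';', '&', '<', '>'].contains c)) then false
  else true

-- ===== PRECONDITION & SPEC =====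
def Spec_f_name_check (filename : String) (out : Bool) : Prop := out = f_name_check_alt filename
instance (filename : String) (out : Bool) : Decidable (Spec_f_name_check filename out) := by unfold Spec_f_name_check; infer_instance

-- ===== CLAIM (what is proved, stated in full; the proofs are below) =====
def Claim_equal_f_name_check : Prop := ∀ (filename : String), Dom_f_name_check filename → Spec_f_name_check filename (f_name_check filename)

-- ===== LEMMAS AND PROOFS =====

-- ===== VERDICT (by name: the statement is the Claim_ definition above) =====
-- [c] is an infix of l iff c is an element of l
theorem singleton_infix_iff_mem (c : Char) (l : List Char) : [c] <:+: l ↔ c ∈ l := by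
  constructor
  · intro h; exact List.singleton_sublist.mp h.sublist
  · intro h
    obtain ⟨s, t, rfl⟩ := List.append_of_mem h
    exact ⟨s, t, by simp⟩

theorem f_name_check_spec : Claim_equal_f_name_check := by
  intro filename _
  unfold Spec_f_name_check f_name_check f_name_check_alt
  by_cases h : filename = ""
  · simp [h]
  · simp only [h, if_false]
    congr 1
    simp only [List.any_eq, PySem.Str.find_ne_neg_one_iff, List.mem_cons]
    simp only [eq_iff_iff, decide_eq_true_eq]
    constructor
    · rintro ⟨fs, hfs, hinf⟩
      fin_cases hfs <;>
        exact ⟨_, (singleton_infix_iff_mem _ _).mp hinf, by decide⟩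
    · rintro ⟨c, hc, hmem⟩
      have hm : c ∈ [';', '&', '<', '>'] := List.mem_of_elem_eq_true hmem
      fin_cases hm
      · exact ⟨";", by simp, (singleton_infix_iff_mem _ _).mpr hc⟩
      · exact ⟨"&", by simp, (singleton_infix_iff_mem _ _).mpr hc⟩
      · exact ⟨"<", by simp, (singleton_infix_iff_mem _ _).mpr hc⟩
      · exact ⟨">", by simp, (singleton_infix_iff_mem _ _).mpr hc⟩
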